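-- pv_equiv track=rewrite | github.com/shellydeforte/PDB | pdb/lib/uni_tools.py | _uni_struct
-- ===== SOURCE A (Python) =====
-- def _uni_struct(struct_list):
--     """Create composite UniProt structure.
--
--     Given a list of pdb secondary structures, create a composite UniProt
--     structure of the form '----OOOOXXXOOOO...'
--
--     This will validate that all the structure strings are the same length
--     before proceeding. It returns 'None' if the structure list is empty.
--
--     Args:
--         struct_list (list of strings): This is a list of all the associated
--             PDB secondary structure strings associated with a single
--             UniProt ID (i.e., ['---XXHHH', 'XXXHHHHH', 'PPPHHIIP'])
--
--     Returns:
--         comp_struct (string): Of the form 'XXXXXOOOO'.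
--         None: If the len(struct_list) == 0.
--
--     """
--     comp_struct = ''
--     for i in range(len(struct_list[0])):
--         one_pos_struct = []
--         for j in range(len(struct_list)):
--             one_pos_struct.append(struct_list[j][i])
--         comp_struct += _eval_one_pos_struct(one_pos_struct)
--     return comp_struct
--
-- def _eval_one_pos_struct(one_pos_struct):
--     """ Evaluates the UniProt structure for one column position.
--
--     Returns the correct designation based on this list.
--     If There are any 'X', then it is 'X'.
--     If it is all '-', then '-'.
--     If there are no 'X', and is not all '-', then 'O'.
--
--     Args:
--         one_pos_struct (list): Of the form ['X', 'X', 'P', 'H', '-', ...]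
--
--     Returns:
--         A single letter, either 'X', '-' or 'O'.
--
--     """
--     if 'X' in one_pos_struct:
--         return 'X'
--     elif ''.join(set(one_pos_struct)) == '-':
--         return '-'
--     else:
--         return 'O'
-- ===== SOURCE B (Python) =====
-- def _uni_struct(struct_list):
--     n = len(struct_list[0])
--     rank = [0] * n
--     for row in struct_list:
--         for i in range(n):
--             c = row[i]
--             rank[i] = max(rank[i], 2 if c == 'X' else (0 if c == '-' else 1))
--     return ''.join('-OX'[r] for r in rank)
-- ===== Notes on version B (the rewrite author's own statement) =====
-- stated objective: alternative
-- what changed: Replaces A's column-major pass that materialises each column as a list and classifies it via set-building with a row-major single pass that keeps one per-column rank (0='-', 1=other, 2='X') merged by max and maps ranks to characters at the end.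
import Mathlib
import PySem

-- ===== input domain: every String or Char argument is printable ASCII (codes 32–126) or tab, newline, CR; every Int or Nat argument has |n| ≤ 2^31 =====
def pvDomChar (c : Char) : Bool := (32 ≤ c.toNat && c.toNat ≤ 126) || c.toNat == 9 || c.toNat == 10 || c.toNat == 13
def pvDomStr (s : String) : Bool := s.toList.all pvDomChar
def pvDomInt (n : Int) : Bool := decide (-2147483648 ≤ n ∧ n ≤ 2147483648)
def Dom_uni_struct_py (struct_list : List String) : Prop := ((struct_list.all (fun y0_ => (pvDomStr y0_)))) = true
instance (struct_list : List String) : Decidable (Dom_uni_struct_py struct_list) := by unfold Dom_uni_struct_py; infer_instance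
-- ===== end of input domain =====

-- B replaces A's column-major set-building with a row-major single pass keeping a per-column
-- rank (0='-', 1=other, 2='X') merged by max; objective: alternative decomposition.

-- ===== PORT A =====
-- _eval_one_pos_struct: ''.join(set(col)) == '-' holds exactly when the set is the singleton {'-'},
-- so comparing the PySem.Set (dedup list) with ['-'] is exact regardless of CPython's set order.
def pvEvalOnePos (col : List Char) : Char :=
  if col.contains 'X' then 'X'
  else if PySem.Set.ofList col = ['-'] then '-'
  else 'O'

def uni_struct_py (struct_list : List String) : String :=
  let comp : List Char :=
    (PySem.List.pyRange 0 (((PySem.List.pyGetD struct_list 0 "").toList.length : Int)) 1).foldl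
      (fun acc i =>
        let one_pos : List Char :=
          (PySem.List.pyRange 0 (struct_list.length : Int) 1).foldl
            (fun c j => c ++ [PySem.List.pyGetD (PySem.List.pyGetD struct_list j "").toList i ' ']) []
        acc ++ [pvEvalOnePos one_pos]) []
  String.ofList comp

-- ===== PORT B =====
def uni_struct_py_alt (struct_list : List String) : String :=
  let n := (PySem.List.pyGetD struct_list 0 "").toList.length
  let rank : List Nat :=
    struct_list.foldl
      (fun (rk : List Nat) row =>
        (List.range n).foldl
          (fun (rk : List Nat) (i : Nat) =>
            let c := PySem.List.pyGetD row.toList (i : Int) ' '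
            rk.set i (max (rk.getD i 0) (if c = 'X' then 2 else if c = '-' then 0 else 1)))
          rk)
      (List.replicate n 0)
  String.ofList (rank.map (fun (r : Nat) => PySem.List.pyGetD ['-', 'O', 'X'] (r : Int) ' '))

-- ===== PRECONDITION & SPEC =====
-- Pre_ excludes exactly the inputs on which Python A raises IndexError: the empty list
-- (struct_list[0]) and lists where some row is shorter than the first row (struct_list[j][i]).
def Pre_uni_struct_py (struct_list : List String) : Prop :=
  struct_list ≠ [] ∧ ∀ s ∈ struct_list, (struct_list.headD "").toList.length ≤ s.toList.length
instance (struct_list : List String) : Decidable (Pre_uni_struct_py struct_list) := by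
  unfold Pre_uni_struct_py; infer_instance
def pvWitness_uni_struct_py : List String := ["--XH-", "HHXX-", "-OX--"]

def Spec_uni_struct_py (struct_list : List String) (out : String) : Prop := out = uni_struct_py_alt struct_list
instance (struct_list : List String) (out : String) : Decidable (Spec_uni_struct_py struct_list out) := by unfold Spec_uni_struct_py; infer_instance

-- ===== CLAIM (what is proved, stated in full; the proofs are below) =====
def Claim_equal_uni_struct_py : Prop := ∀ (struct_list : List String), Dom_uni_struct_py struct_list → Pre_uni_struct_py struct_list → Spec_uni_struct_py struct_list (uni_struct_py struct_list)

-- ===== LEMMAS AND PROOFS =====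

-- rank of one char, as both ports compute it inline
def pvRank (c : Char) : Nat := if c = 'X' then 2 else if c = '-' then 0 else 1

-- one update of B's inner loop (definitionally the port's lambda)
def pvStep (row : List Char) (rk : List Nat) (i : Nat) : List Nat :=
  rk.set i (max (rk.getD i 0) (pvRank (PySem.List.pyGetD row (i : Int) ' ')))

theorem pvRank_le (c : Char) : pvRank c ≤ 2 := by
  unfold pvRank; split_ifs <;> omega

theorem pvRank_eq_zero (c : Char) : pvRank c = 0 ↔ c = '-' := by
  unfold pvRank
  constructor
  · intro h
    by_contra hno
    split_ifs at h
  · intro h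
    simp [h]

theorem pvOuter_len (L : List String) (n : Nat) (st : List Nat)
    (h : ∀ (row : List Char) (st' : List Nat), ((List.range n).foldl (pvStep row) st').length = st'.length) :
    (L.foldl (fun rk row => (List.range n).foldl (pvStep row.toList) rk) st).length = st.length := by
  induction L generalizing st with
  | nil => rfl
  | cons row tl ih => rw [List.foldl_cons, ih, h]

theorem pvInner_len (row : List Char) (k : Nat) (st : List Nat) :
    ((List.range k).foldl (pvStep row) st).length = st.length := by
  induction k generalizing st with
  | zero => rfl
  | succ m ih => rw [List.range_succ, List.foldl_append]; simp [ih, pvStep]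

theorem pvStep_getD_self (row : List Char) (rk : List Nat) (i : Nat) (h : i < rk.length) :
    (pvStep row rk i).getD i 0 = max (rk.getD i 0) (pvRank (PySem.List.pyGetD row (i : Int) ' ')) := by
  unfold pvStep
  rw [List.getD_eq_getElem?_getD, List.getElem?_set_self h]
  simp

theorem pvStep_getD_ne (row : List Char) (rk : List Nat) (i j : Nat) (h : j ≠ i) :
    (pvStep row rk i).getD j 0 = rk.getD j 0 := by
  unfold pvStep
  rw [List.getD_eq_getElem?_getD, List.getElem?_set_ne (by omega), ← List.getD_eq_getElem?_getD]

theorem pvInner_getD (row : List Char) (k : Nat) (st : List Nat) (hk : k ≤ st.length) (i : Nat) :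
    ((List.range k).foldl (pvStep row) st).getD i 0 =
      if i < k then max (st.getD i 0) (pvRank (PySem.List.pyGetD row (i : Int) ' '))
      else st.getD i 0 := by
  induction k with
  | zero => simp
  | succ m ih =>
    rw [List.range_succ, List.foldl_append, List.foldl_cons, List.foldl_nil]
    by_cases hi : i = m
    · subst hi
      rw [pvStep_getD_self _ _ _ (by rw [pvInner_len]; omega), ih (by omega)]
      simp
    · rw [pvStep_getD_ne _ _ _ _ hi, ih (by omega)]
      by_cases h2 : i < m
      · simp [h2, (show i < m + 1 by omega)]
      · simp [h2, (show ¬ i < m + 1 by omega)]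

-- B's outer loop: position i < n of the final rank list is the running max over the rows
theorem pvOuter_getD (L : List String) (n : Nat) (st : List Nat) (hlen : st.length = n)
    (i : Nat) (hi : i < n) :
    ((L.foldl (fun rk row => (List.range n).foldl (pvStep row.toList) rk) st).getD i 0 =
      L.foldl (fun m row => max m (pvRank (PySem.List.pyGetD row.toList (i : Int) ' ')))
        (st.getD i 0)) ∧
    (L.foldl (fun rk row => (List.range n).foldl (pvStep row.toList) rk) st).length = n := by
  induction L generalizing st with
  | nil => exact ⟨rfl, hlen⟩
  | cons row tl ih =>
    have hl1 : ((List.range n).foldl (pvStep row.toList) st).length = n := by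
      rw [pvInner_len]; exact hlen
    obtain ⟨hg2, hl2⟩ := ih _ hl1
    refine ⟨?_, hl2⟩
    simp only [List.foldl_cons]
    rw [hg2, pvInner_getD row.toList n st (by omega) i, if_pos hi]

theorem pvFoldMax_start (L : List Char) (a : Nat) :
    L.foldl (fun m c => max m (pvRank c)) a = max a (L.foldl (fun m c => max m (pvRank c)) 0) := by
  induction L generalizing a with
  | nil => simp
  | cons c tl ih =>
    simp only [List.foldl_cons]
    rw [ih (max a (pvRank c)), ih (max 0 (pvRank c))]
    omega

theorem pvFoldMax_le (L : List Char) : L.foldl (fun m c => max m (pvRank c)) 0 ≤ 2 := by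
  induction L with
  | nil => simp
  | cons c tl ih =>
    simp only [List.foldl_cons]
    rw [pvFoldMax_start]
    have := pvRank_le c
    omega

theorem pvContainsX_iff (L : List Char) :
    'X' ∈ L ↔ L.foldl (fun m c => max m (pvRank c)) 0 = 2 := by
  induction L with
  | nil => simp
  | cons c tl ih =>
    simp only [List.foldl_cons]
    rw [pvFoldMax_start]
    have htle := pvFoldMax_le tl
    have hcle := pvRank_le c
    constructor
    · intro h
      rcases List.mem_cons.mp h with h | h
      · have hc : pvRank c = 2 := by rw [← h]; rfl
        omega
      · have := ih.mp h
        omega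
    · intro h
      by_cases hc : c = 'X'
      · exact List.mem_cons.mpr (Or.inl hc.symm)
      · have h0 : pvRank c ≤ 1 := by simp [pvRank, hc]; split_ifs <;> omega
        have : tl.foldl (fun m c => max m (pvRank c)) 0 = 2 := by omega
        exact List.mem_cons.mpr (Or.inr (ih.mpr this))

theorem pvAllDash_iff (L : List Char) :
    (∀ c ∈ L, c = '-') ↔ L.foldl (fun m c => max m (pvRank c)) 0 = 0 := by
  induction L with
  | nil => simp
  | cons c tl ih =>
    simp only [List.foldl_cons]
    rw [pvFoldMax_start]
    constructor
    · intro h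
      have hc := h c (List.mem_cons_self ..)
      have ht : tl.foldl (fun m c => max m (pvRank c)) 0 = 0 :=
        ih.mp (fun d hd => h d (List.mem_cons_of_mem _ hd))
      have hc0 : pvRank c = 0 := by rw [hc]; rfl
      omega
    · intro h
      have hc : pvRank c = 0 := by omega
      have ht := ih.mpr (by omega)
      intro d hd
      rcases List.mem_cons.mp hd with h' | h'
      · rw [h']
        exact (pvRank_eq_zero _).mp hc
      · exact ht d h'

theorem pvSet_singleton_iff (L : List Char) :
    PySem.Set.ofList L = ['-'] ↔ (∀ c ∈ L, c = '-') ∧ L ≠ [] := by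
  constructor
  · intro h
    have hmem : ∀ c, c ∈ L ↔ c ∈ (['-'] : List Char) := by
      intro c; rw [← h]; exact (PySem.Set.mem_ofList L c).symm
    refine ⟨fun c hc => by simpa using (hmem c).mp hc, ?_⟩
    intro hnil; subst hnil; simp [PySem.Set.ofList, PySem.Set.empty] at h
  · rintro ⟨hall, hne'⟩
    obtain ⟨c, tl, rfl⟩ := List.exists_cons_of_ne_nil hne'
    have hc := hall c (List.mem_cons_self ..)
    subst hc
    have key : ∀ (t : List Char), (∀ c ∈ t, c = '-') →
        t.foldl PySem.Set.add ['-'] = ['-'] := by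
      intro t
      induction t with
      | nil => intro _; rfl
      | cons d t iht =>
        intro h
        have hd := h d (List.mem_cons_self ..)
        subst hd
        simp only [List.foldl_cons]
        have hsd : PySem.Set.add ['-'] '-' = ['-'] := by decide
        rw [hsd]
        exact iht (fun e he => h e (List.mem_cons_of_mem _ he))
    rw [PySem.Set.ofList_eq_foldl]
    simp only [List.foldl_cons]
    have h1 : PySem.Set.add ([] : PySem.Set Char) '-' = ['-'] := by decide
    rw [h1]
    exact key tl (fun e he => hall e (List.mem_cons_of_mem _ he))

-- the column's composite char equals the rank-max char, for a nonempty column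
theorem pvEval_eq_rank (L : List Char) (hne : L ≠ []) :
    pvEvalOnePos L =
      PySem.List.pyGetD ['-', 'O', 'X'] ((L.foldl (fun m c => max m (pvRank c)) 0 : Nat) : Int) ' ' := by
  have hle := pvFoldMax_le L
  set mx := L.foldl (fun m c => max m (pvRank c)) 0 with hmx
  unfold pvEvalOnePos
  interval_cases mx
  · have hX : ¬ 'X' ∈ L := by
      intro h; have := (pvContainsX_iff L).mp h; omega
    have hS : PySem.Set.ofList L = ['-'] :=
      (pvSet_singleton_iff L).mpr ⟨(pvAllDash_iff L).mpr hmx.symm, hne⟩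
    simp [hX, hS]
  · have hX : ¬ 'X' ∈ L := by
      intro h; have := (pvContainsX_iff L).mp h; omega
    have hS : ¬ PySem.Set.ofList L = ['-'] := by
      intro h; have := (pvAllDash_iff L).mp ((pvSet_singleton_iff L).mp h).1; omega
    simp [hX, hS]
    decide
  · have hX : 'X' ∈ L := (pvContainsX_iff L).mpr hmx.symm
    simp [hX]
    decide

-- ===== VERDICT (by name: the statement is the Claim_ definition above) =====
theorem uni_struct_py_spec : Claim_equal_uni_struct_py := by
  intro struct_list _ hpre
  show _ = _
  obtain ⟨hne, _⟩ := hpre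
  unfold uni_struct_py uni_struct_py_alt
  simp only [PySem.List.foldl_append_singleton_eq_map, List.nil_append]
  set n := (PySem.List.pyGetD struct_list 0 "").toList.length with hn
  set rank := struct_list.foldl
      (fun (rk : List Nat) row =>
        (List.range n).foldl
          (fun (rk : List Nat) (i : Nat) =>
            let c := PySem.List.pyGetD row.toList (i : Int) ' '
            rk.set i (max (rk.getD i 0) (if c = 'X' then 2 else if c = '-' then 0 else 1)))
          rk)
      (List.replicate n 0) with hrankdef
  have hdef : rank = struct_list.foldl
      (fun rk row => (List.range n).foldl (pvStep row.toList) rk) (List.replicate n 0) := rfl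
  have hout := fun (i : Nat) (hi : i < n) =>
    pvOuter_getD struct_list n (List.replicate n 0) (by simp) i hi
  have hlenr : rank.length = n := by
    rw [hdef, pvOuter_len _ _ _ (fun row st' => pvInner_len row n st'), List.length_replicate]
  simp only [PySem.List.pyRange_zero_nat, List.map_map]
  congr 1
  apply List.ext_getElem
  · simp [hlenr]
  · intro i h1 h2
    simp only [List.getElem_map, List.getElem_range, Function.comp]
    have hi : i < n := by simpa [hlenr] using h2
    have hcol : (List.range struct_list.length).map
        (fun (k : Nat) => PySem.List.pyGetD struct_list (k : Int) "") = struct_list := by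
      apply List.ext_getElem
      · simp
      · intro j hj hj'
        simp [PySem.List.pyGetD_natCast, List.getD_eq_getElem?_getD, List.getElem?_eq_getElem hj']
    rw [show ((fun (x : Int) => PySem.List.pyGetD (PySem.List.pyGetD struct_list x "").toList (i : Int) ' ')
          ∘ (fun (k : Nat) => (k : Int)))
        = (fun s => PySem.List.pyGetD s.toList (i : Int) ' ') ∘ (fun (k : Nat) => PySem.List.pyGetD struct_list (k : Int) "") from rfl,
      ← List.map_map, hcol]
    rw [pvEval_eq_rank _ (by simpa using hne), List.foldl_map]
    have hr : rank[i] = List.foldl (fun m row => max m (pvRank (PySem.List.pyGetD row.toList (i : Int) ' '))) 0 struct_list := by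
      have h0 : rank[i] = rank.getD i 0 := by
        rw [List.getD_eq_getElem?_getD, List.getElem?_eq_getElem (show i < rank.length by omega)]
        rfl
      rw [h0, hdef]
      have := (hout i hi).1
      simpa using this
    rw [hr]
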